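-- pv_equiv track=rewrite | github.com/pypi-data/pypi-mirror-403 | packages/nc1709/nc1709-3.0.31-py3-none-any.whl/nc1709/agent/components/response_formatter.py | _looks_like_code_or_data
-- ===== SOURCE A (Python) =====
-- def _looks_like_code_or_data(text: str) -> bool:
--     """Determine if text looks like code or structured data"""
--     # Check for common code/data patterns
--     code_indicators = [
--         '{', '}',  # JSON/code blocks
--         '<?xml', '<!DOCTYPE',  # XML
--         'def ', 'class ', 'function ',  # Python/JS functions
--         '#include', 'import ',  # Includes/imports
--         'SELECT ', 'CREATE ', 'UPDATE ',  # SQL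
--         'HTTP/', 'Content-Type:',  # HTTP
--     ]
--
--     text_lower = text.lower()
--     return any(indicator.lower() in text_lower for indicator in code_indicators)
-- ===== SOURCE B (Python) =====
-- _INDICATORS_LOWER = [s.lower() for s in [
--     '{', '}',
--     '<?xml', '<!DOCTYPE',
--     'def ', 'class ', 'function ',
--     '#include', 'import ',
--     'SELECT ', 'CREATE ', 'UPDATE ',
--     'HTTP/', 'Content-Type:',
-- ]]
--
--
-- def _looks_like_code_or_data(text: str) -> bool:
--     tl = text.lower()
--     for i in range(len(tl)):
--         for ind in _INDICATORS_LOWER: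
--             if tl.startswith(ind, i):
--                 return True
--     return False
-- ===== Notes on version B (the rewrite author's own statement) =====
-- stated objective: alternative
-- what changed: Instead of one full substring scan per indicator ('ind in text_lower' 14 times), B lowercases once and makes a single left-to-right pass over positions, testing at each position whether any pre-lowered indicator is a prefix there, returning on the first hit.
import Mathlib
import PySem

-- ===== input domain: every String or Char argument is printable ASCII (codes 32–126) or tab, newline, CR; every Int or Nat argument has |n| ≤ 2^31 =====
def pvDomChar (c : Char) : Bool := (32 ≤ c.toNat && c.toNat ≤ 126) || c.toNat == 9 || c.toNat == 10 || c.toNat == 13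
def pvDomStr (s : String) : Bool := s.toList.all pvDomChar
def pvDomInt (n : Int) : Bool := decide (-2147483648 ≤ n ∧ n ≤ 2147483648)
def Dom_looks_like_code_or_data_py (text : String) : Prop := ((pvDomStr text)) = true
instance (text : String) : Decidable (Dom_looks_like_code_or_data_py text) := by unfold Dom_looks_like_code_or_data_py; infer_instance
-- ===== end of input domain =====

-- B replaces A's per-indicator substring scans by one positional pass over the lowered text
-- testing pre-lowered indicators as prefixes (objective: alternative, same cost).

-- ===== PORT A =====
def pvCodeIndicators : List String :=
  ["{", "}", "<?xml", "<!DOCTYPE", "def ", "class ", "function ",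
   "#include", "import ", "SELECT ", "CREATE ", "UPDATE ", "HTTP/", "Content-Type:"]

def looks_like_code_or_data_py (text : String) : Bool :=
  let textLower := PySem.Str.lower text
  pvCodeIndicators.any (fun ind => PySem.Str.isIn (PySem.Str.lower ind) textLower)

-- ===== PORT B =====
-- _INDICATORS_LOWER = [s.lower() for s in [...]]
def pvIndicatorsLower : List (List Char) :=
  (["{", "}", "<?xml", "<!DOCTYPE", "def ", "class ", "function ",
    "#include", "import ", "SELECT ", "CREATE ", "UPDATE ", "HTTP/", "Content-Type:"].map
    (fun s => PySem.Chars.lower s.toList))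

-- the 'for i in range(len(tl))' loop: one suffix per position; 'tl.startswith(ind, i)' = prefix test
def pvScan (l : List Char) : Bool :=
  match l with
  | [] => false
  | c :: rest => pvIndicatorsLower.any (fun p => p.isPrefixOf (c :: rest)) || pvScan rest

def looks_like_code_or_data_py_alt (text : String) : Bool :=
  pvScan (PySem.Chars.lower text.toList)

-- ===== PRECONDITION & SPEC =====
def Spec_looks_like_code_or_data_py (text : String) (out : Bool) : Prop := out = looks_like_code_or_data_py_alt text
instance (text : String) (out : Bool) : Decidable (Spec_looks_like_code_or_data_py text out) := by unfold Spec_looks_like_code_or_data_py; infer_instance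

-- ===== CLAIM (what is proved, stated in full; the proofs are below) =====
def Claim_equal_looks_like_code_or_data_py : Prop := ∀ (text : String), Dom_looks_like_code_or_data_py text → Spec_looks_like_code_or_data_py text (looks_like_code_or_data_py text)

-- ===== LEMMAS AND PROOFS =====

-- the positional scan finds exactly the indicators that occur as infixes
theorem pvScan_eq_infix (l : List Char) :
    pvScan l = pvIndicatorsLower.any (fun p => decide (p <:+: l)) := by
  induction l with
  | nil => decide
  | cons c rest ih =>
      rw [Bool.eq_iff_iff]
      simp only [pvScan, ih, Bool.or_eq_true, List.any_eq_true, decide_eq_true_eq,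
        List.isPrefixOf_iff_prefix, List.infix_cons_iff]
      constructor
      · rintro (⟨p, hp, h⟩ | ⟨p, hp, h⟩) <;> exact ⟨p, hp, by tauto⟩
      · rintro ⟨p, hp, h | h⟩
        exacts [Or.inl ⟨p, hp, h⟩, Or.inr ⟨p, hp, h⟩]

theorem looks_like_code_or_data_py_spec : Claim_equal_looks_like_code_or_data_py := by
  intro text _
  unfold Spec_looks_like_code_or_data_py looks_like_code_or_data_py looks_like_code_or_data_py_alt
  rw [pvScan_eq_infix]
  show pvCodeIndicators.any _ = _
  unfold pvIndicatorsLower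
  rw [List.any_map]
  apply PySem.List.any_congr_mem  -- pointwise: isIn (lower ind) (lower text) = infix test
  intro ind _
  simp [PySem.Str.isIn, PySem.Str.lower]
  by_cases h : PySem.Chars.lower ind.toList <:+: PySem.Chars.lower text.toList
  · simp [h, (PySem.Chars.isIn_iff_infix _ _).2 h]
  · simp [h, (PySem.Chars.isIn_eq_false_iff _ _).2 h]
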